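-- pv_equiv track=rewrite | github.com/ketkat001/Programmers-coding | weekly/week3.py | matching_puzzle
-- ===== SOURCE A (Python) =====
-- def possible(puzzle, match_puzzle):
--     for _ in range(4):
--         match_puzzle = [list(reversed(i)) for i in zip(*match_puzzle)]
--         if puzzle == match_puzzle:
--             return True
--     return False
--
-- def matching_puzzle(puzzle, puzzle_length, puzzle_dict, answer):
--     match_puzzles = puzzle_dict[puzzle_length]
--     for match_puzzle in match_puzzles:
--         if possible(puzzle, match_puzzle):
--             answer += puzzle_length
--             puzzle_dict[puzzle_length].remove(match_puzzle)
--             return answer, puzzle_dict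
--     return answer, puzzle_dict
-- ===== SOURCE B (Python) =====
-- def matching_puzzle(puzzle, puzzle_length, puzzle_dict, answer):
--     def rot(g):
--         return [list(reversed(col)) for col in zip(*g)]
--     r1 = rot(puzzle)
--     r2 = rot(r1)
--     r3 = rot(r2)
--     targets = [puzzle, r1, r2, r3]
--     candidates = puzzle_dict[puzzle_length]
--     for i, cand in enumerate(candidates):
--         if rot(cand) in targets:
--             candidates.pop(i)
--             return answer + puzzle_length, puzzle_dict
--     return answer, puzzle_dict
-- ===== Notes on version B (the rewrite author's own statement) =====
-- stated objective: alternative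
-- what changed: B precomputes the four rotations of puzzle once before the scan and tests each candidate with a single rotation plus a membership check (popping the hit by index), instead of A's per-candidate loop that rotates every candidate up to four times and re-scans the list with .remove; Pre_ restricts puzzle to the task's natural domain of rectangular grids (empty or equal positive row lengths), because on ragged puzzles B's hoisted rotation set can accept a candidate that A rejects, and also excludes puzzle_length missing from puzzle_dict, where A raises KeyError.
import Mathlib
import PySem

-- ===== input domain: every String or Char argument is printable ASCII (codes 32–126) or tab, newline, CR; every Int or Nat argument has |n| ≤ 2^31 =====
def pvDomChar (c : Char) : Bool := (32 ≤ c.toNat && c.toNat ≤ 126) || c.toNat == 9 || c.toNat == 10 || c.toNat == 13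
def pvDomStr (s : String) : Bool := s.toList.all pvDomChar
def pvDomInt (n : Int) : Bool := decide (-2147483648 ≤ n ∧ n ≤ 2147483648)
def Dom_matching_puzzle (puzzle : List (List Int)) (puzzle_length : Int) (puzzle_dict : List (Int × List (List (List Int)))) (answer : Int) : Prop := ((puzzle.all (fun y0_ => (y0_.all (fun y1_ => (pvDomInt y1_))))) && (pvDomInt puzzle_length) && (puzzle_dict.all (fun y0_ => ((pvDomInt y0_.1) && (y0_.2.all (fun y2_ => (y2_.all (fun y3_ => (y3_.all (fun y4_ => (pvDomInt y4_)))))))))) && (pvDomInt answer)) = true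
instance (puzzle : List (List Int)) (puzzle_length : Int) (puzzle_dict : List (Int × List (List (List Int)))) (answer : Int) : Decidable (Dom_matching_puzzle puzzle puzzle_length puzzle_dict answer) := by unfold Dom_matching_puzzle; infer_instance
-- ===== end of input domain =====

-- B precomputes puzzle's four rotations once and tests each candidate with a single rotation +
-- membership (popping by index), instead of rotating every candidate up to four times; Pre_
-- restricts puzzle to rectangular grids (the task's natural domain) and to keys present in
-- puzzle_dict; both Pythons mutate puzzle_dict in place the same way (first hit removed).


-- ===== PORT A =====
-- termination helper for pyZipStar (cited in its decreasing_by)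
theorem pv_tail_sum_le (g : List (List Int)) :
    ((g.map List.tail).map List.length).sum ≤ (g.map List.length).sum := by
  induction g with
  | nil => simp
  | cons r gs ih =>
      simp only [List.map_cons, List.sum_cons, List.length_tail]
      omega

theorem pv_attach_tail (g : List (List Int)) :
    List.map (fun x : {x // x ∈ g} => (x.1).tail) g.attach = List.map List.tail g := by simp

-- zip(*g): stops as soon as any row is exhausted (or there are no rows)
def pyZipStar (g : List (List Int)) : List (List Int) :=
  if h : g = [] ∨ g.any (fun r => r.isEmpty) then []
  else (g.map (fun r => r.headD 0)) :: pyZipStar (g.map List.tail)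
termination_by (g.map List.length).sum
decreasing_by
  rw [pv_attach_tail]
  rw [not_or] at h
  obtain ⟨h1, h2⟩ := h
  cases g with
  | nil => exact absurd rfl h1
  | cons r gs =>
      have hr : r ≠ [] := by
        intro hc
        subst hc
        simp at h2
      have hle := pv_tail_sum_le gs
      have hlt : r.tail.length < r.length := by
        cases r with
        | nil => exact absurd rfl hr
        | cons a as => simp
      simp only [List.map_cons, List.sum_cons]
      omega

-- one quarter-turn: [list(reversed(i)) for i in zip(*g)]
def rot (g : List (List Int)) : List (List Int) := (pyZipStar g).map List.reverse

-- A's possible: rotate up to four times, comparing after each turn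
def possibleStep : Nat → List (List Int) → List (List Int) → Bool
  | 0, _, _ => false
  | k+1, p, m =>
      let m' := rot m
      if p = m' then true else possibleStep k p m'

def possibleA (p m : List (List Int)) : Bool := possibleStep 4 p m

-- list.remove: drop the first equal element (exact here: A only removes an element it found)
def removeF (x : List (List Int)) : List (List (List Int)) → List (List (List Int))
  | [] => []
  | y :: ys => if y = x then ys else y :: removeF x ys

-- the for-loop with early return: first candidate accepted by possible
def findMatch (p : List (List Int)) : List (List (List Int)) → Option (List (List Int))
  | [] => none
  | m :: ms => if possibleA p m then some m else findMatch p ms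

-- dict lookup (first match) and in-place overwrite of an existing key's value
def assocGet? (d : List (Int × List (List (List Int)))) (k : Int) : Option (List (List (List Int))) :=
  match d with
  | [] => none
  | (k', v) :: rest => if k' = k then some v else assocGet? rest k

def assocSet (d : List (Int × List (List (List Int)))) (k : Int) (v : List (List (List Int))) : List (Int × List (List (List Int))) :=
  match d with
  | [] => []
  | (k', v') :: rest => if k' = k then (k', v) :: rest else (k', v') :: assocSet rest k v

def matching_puzzle (puzzle : List (List Int)) (puzzle_length : Int) (puzzle_dict : List (Int × List (List (List Int)))) (answer : Int) : Int × (List (Int × List (List (List Int)))) :=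
  match assocGet? puzzle_dict puzzle_length with
  | none => (answer, puzzle_dict)  -- Python raises KeyError here; excluded by Pre_
  | some ms =>
      match findMatch puzzle ms with
      | some m => (answer + puzzle_length, assocSet puzzle_dict puzzle_length (removeF m ms))
      | none => (answer, puzzle_dict)

-- ===== PORT B =====
-- targets = [puzzle, r1, r2, r3] with r1 = rot(puzzle), r2 = rot(r1), r3 = rot(r2)
def targetsB (p : List (List Int)) : List (List (List Int)) :=
  let r1 := rot p
  let r2 := rot r1
  let r3 := rot r2
  [p, r1, r2, r3]

-- the enumerate/pop(i) scan: returns the candidate list with the first hit popped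
def scanB (ts : List (List (List Int))) : List (List (List Int)) → Option (List (List (List Int)))
  | [] => none
  | m :: ms => if rot m ∈ ts then some ms else (scanB ts ms).map (m :: ·)

def matching_puzzle_alt (puzzle : List (List Int)) (puzzle_length : Int) (puzzle_dict : List (Int × List (List (List Int)))) (answer : Int) : Int × (List (Int × List (List (List Int)))) :=
  match assocGet? puzzle_dict puzzle_length with
  | none => (answer, puzzle_dict)  -- Python raises KeyError here; excluded by Pre_
  | some ms =>
      match scanB (targetsB puzzle) ms with
      | some ms' => (answer + puzzle_length, assocSet puzzle_dict puzzle_length ms')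
      | none => (answer, puzzle_dict)

-- ===== PRECONDITION & SPEC =====
-- rectangular grid: empty, or all rows of the same positive length
def RectP (p : List (List Int)) : Prop :=
  p = [] ∨ ((∀ r ∈ p, r.length = (p.headD []).length) ∧ 0 < (p.headD []).length)

-- Pre_ excludes inputs where A raises KeyError (puzzle_length not a key of puzzle_dict) and
-- restricts puzzle to the task's natural domain of rectangular grids: on a ragged puzzle B's
-- hoisted rotation set can accept a candidate that A rejects.
def Pre_matching_puzzle (puzzle : List (List Int)) (puzzle_length : Int) (puzzle_dict : List (Int × List (List (List Int)))) (answer : Int) : Prop :=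
  puzzle_length ∈ puzzle_dict.map Prod.fst ∧ RectP puzzle
instance (puzzle : List (List Int)) (puzzle_length : Int) (puzzle_dict : List (Int × List (List (List Int)))) (answer : Int) : Decidable (Pre_matching_puzzle puzzle puzzle_length puzzle_dict answer) := by unfold Pre_matching_puzzle RectP; infer_instance

def pvWitness_matching_puzzle : List (List Int) × Int × (List (Int × List (List (List Int)))) × Int :=
  ([[1, 2], [3, 4]], 2, [(2, [[[4, 2], [3, 1]], [[3, 1], [4, 2]]])], 0)

def Spec_matching_puzzle (puzzle : List (List Int)) (puzzle_length : Int) (puzzle_dict : List (Int × List (List (List Int)))) (answer : Int) (out : Int × (List (Int × List (List (List Int))))) : Prop := out = matching_puzzle_alt puzzle puzzle_length puzzle_dict answer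
instance (puzzle : List (List Int)) (puzzle_length : Int) (puzzle_dict : List (Int × List (List (List Int)))) (answer : Int) (out : Int × (List (Int × List (List (List Int))))) : Decidable (Spec_matching_puzzle puzzle puzzle_length puzzle_dict answer out) := by unfold Spec_matching_puzzle; infer_instance

-- ===== CLAIM (what is proved, stated in full; the proofs are below) =====
def Claim_equal_matching_puzzle : Prop := ∀ (puzzle : List (List Int)) (puzzle_length : Int) (puzzle_dict : List (Int × List (List (List Int)))) (answer : Int), Dom_matching_puzzle puzzle puzzle_length puzzle_dict answer → Pre_matching_puzzle puzzle puzzle_length puzzle_dict answer → Spec_matching_puzzle puzzle puzzle_length puzzle_dict answer (matching_puzzle puzzle puzzle_length puzzle_dict answer)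

-- ===== LEMMAS AND PROOFS =====

-- the r×c grid built from an entry function
def gridF (r c : Nat) (f : Nat → Nat → Int) : List (List Int) :=
  (List.range r).map (fun i => (List.range c).map (fun j => f i j))

theorem grid_congr {r c : Nat} {f g : Nat → Nat → Int}
    (h : ∀ i < r, ∀ j < c, f i j = g i j) : gridF r c f = gridF r c g := by
  unfold gridF
  apply List.map_congr_left
  intro i hi
  apply List.map_congr_left
  intro j hj
  exact h i (List.mem_range.mp hi) j (List.mem_range.mp hj)

theorem range_reverse_map (n : Nat) :
    (List.range n).reverse = (List.range n).map (fun i => n - 1 - i) := by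
  apply List.ext_getElem
  · simp
  · intro i h1 h2
    simp

theorem rev_range_map (n : Nat) (g : Nat → Int) :
    ((List.range n).map g).reverse = (List.range n).map (fun i => g (n - 1 - i)) := by
  rw [← List.map_reverse, range_reverse_map, List.map_map]
  rfl

theorem grid_succ (n r : Nat) (h : Nat → Nat → Int) :
    gridF (n+1) r h = ((List.range r).map (h 0)) :: gridF n r (fun j i => h (j+1) i) := by
  unfold gridF
  rw [List.range_succ_eq_map]
  simp [List.map_map]

theorem zs_grid (r : Nat) (hr : 0 < r) : ∀ (c : Nat) (f : Nat → Nat → Int),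
    pyZipStar (gridF r (c+1) f) = gridF (c+1) r (fun j i => f i j) := by
  intro c
  induction c with
  | zero =>
      intro f
      rw [pyZipStar]
      have hne : gridF r 1 f ≠ [] := by
        unfold gridF
        simp [List.eq_nil_iff_length_eq_zero]
        omega
      have hrows : (gridF r 1 f).any (fun r => r.isEmpty) = false := by
        unfold gridF
        simp [List.any_map, List.any_eq_false]
      rw [dif_neg (by simp [hne, hrows])]
      have htails : (gridF r 1 f).map List.tail = gridF r 0 (fun i j => f i (j+1)) := by
        unfold gridF
        simp [List.map_map, Function.comp_def]
      rw [htails, pyZipStar]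
      have : gridF r 0 (fun i j => f i (j+1)) = [] ∨ (gridF r 0 (fun i j => f i (j+1))).any (fun r => r.isEmpty) = true := by
        right
        unfold gridF
        cases r with
        | zero => omega
        | succ n => simp [List.range_succ_eq_map]
      rw [dif_pos this]
      have hheads : (gridF r 1 f).map (fun row => row.headD 0) = (List.range r).map (fun i => f i 0) := by
        unfold gridF
        simp [List.map_map]
      rw [hheads]
      unfold gridF
      simp [List.range_succ_eq_map]
  | succ c ih =>
      intro f
      rw [pyZipStar]
      have hne : gridF r (c+2) f ≠ [] := by
        unfold gridF
        simp [List.eq_nil_iff_length_eq_zero]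
        omega
      have hrows : (gridF r (c+2) f).any (fun r => r.isEmpty) = false := by
        unfold gridF
        simp [List.any_map, List.any_eq_false]
      rw [dif_neg (by simp [hne, hrows])]
      have htails : (gridF r (c+2) f).map List.tail = gridF r (c+1) (fun i j => f i (j+1)) := by
        unfold gridF
        simp only [List.map_map]
        apply List.map_congr_left
        intro i _
        simp [List.range_succ_eq_map, List.map_map]
      rw [htails, ih]
      have hheads : (gridF r (c+2) f).map (fun row => row.headD 0) = (List.range r).map (fun i => f i 0) := by
        unfold gridF
        simp only [List.map_map]
        apply List.map_congr_left
        intro i _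
        simp [List.range_succ_eq_map]
      rw [hheads, grid_succ, grid_succ, grid_succ]

theorem rot_grid (r c : Nat) (f : Nat → Nat → Int) (hr : 0 < r) (hc : 0 < c) :
    rot (gridF r c f) = gridF c r (fun j i => f (r - 1 - i) j) := by
  obtain ⟨c', rfl⟩ := Nat.exists_eq_succ_of_ne_zero (Nat.pos_iff_ne_zero.mp hc)
  unfold rot
  rw [zs_grid r hr c' f]
  unfold gridF
  simp only [List.map_map]
  apply List.map_congr_left
  intro j _
  simp only [Function.comp_apply]
  exact rev_range_map r (fun i => f i j)

theorem pyZipStar_nil : pyZipStar [] = [] := by rw [pyZipStar]; rfl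

theorem rot_nil : rot [] = [] := by simp [rot, pyZipStar_nil]

-- every row of pyZipStar g has length g.length
theorem zs_row_len (g : List (List Int)) : ∀ row ∈ pyZipStar g, row.length = g.length := by
  induction g using pyZipStar.induct with
  | case1 g h => rw [pyZipStar, dif_pos h]; simp
  | case2 g h ih =>
      rw [pv_attach_tail] at ih
      rw [pyZipStar, dif_neg h]
      intro row hrow
      rcases List.mem_cons.mp hrow with h1 | h2
      · simp [h1]
      · have := ih row h2
        simpa using this

theorem zs_ne_nil (g : List (List Int)) (h : pyZipStar g ≠ []) : g ≠ [] := by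
  intro hg
  subst hg
  exact h pyZipStar_nil

-- the result of a rotation is always rectangular
theorem rect_rot (m : List (List Int)) : RectP (rot m) := by
  unfold RectP
  cases hz : pyZipStar m with
  | nil => left; simp [rot, hz]
  | cons row rest =>
      have hne : pyZipStar m ≠ [] := by simp [hz]
      have hm : m ≠ [] := zs_ne_nil m hne
      have hlen : ∀ r ∈ pyZipStar m, r.length = m.length := zs_row_len m
      have hmpos : 0 < m.length := List.length_pos_iff.mpr hm
      have hrow : row.length = m.length := hlen row (by simp [hz])
      right
      simp only [rot, hz, List.map_cons, List.headD_cons, List.length_reverse]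
      constructor
      · intro x hx
        simp only [List.mem_cons] at hx
        rcases hx with rfl | hx
        · simp
        · rcases List.mem_map.mp hx with ⟨y, hy, rfl⟩
          simp [hlen y (by simp [hz, hy]), hrow]
      · omega

-- a rectangular nonempty grid is a gridF of its entries
theorem rect_to_grid (x : List (List Int)) (hrect : RectP x) (hx : x ≠ []) :
    x = gridF x.length (x.headD []).length (fun i j => (x.getD i []).getD j 0)
      ∧ 0 < x.length ∧ 0 < (x.headD []).length := by
  rcases hrect with h | ⟨hall, hpos⟩
  · exact absurd h hx
  refine ⟨?_, List.length_pos_iff.mpr hx, hpos⟩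
  apply List.ext_getElem
  · simp [gridF]
  · intro i h1 h2
    unfold gridF
    rw [List.getElem_map, List.getElem_range]
    have hrowlen : x[i].length = (x.headD []).length := hall x[i] (List.getElem_mem h1)
    apply List.ext_getElem
    · simp [hrowlen]
    · intro j hj1 hj2
      rw [List.getElem_map, List.getElem_range]
      show x[i][j] = (x.getD i []).getD j 0
      have hrow : x.getD i [] = x[i] := by
        rw [List.getD_eq_getElem?_getD, List.getElem?_eq_getElem h1]
        rfl
      rw [hrow, List.getD_eq_getElem?_getD, List.getElem?_eq_getElem hj1]
      rfl

-- on rectangular grids a rotation has order 4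
theorem rot4 (x : List (List Int)) (hrect : RectP x) :
    rot (rot (rot (rot x))) = x := by
  by_cases hx : x = []
  · subst hx; simp [rot_nil]
  obtain ⟨hgrid, hr, hc⟩ := rect_to_grid x hrect hx
  set r := x.length with hrdef
  set c := (x.headD []).length with hcdef
  set f : Nat → Nat → Int := fun i j => (x.getD i []).getD j 0 with hfdef
  rw [hgrid]
  rw [rot_grid r c f hr hc]
  rw [rot_grid c r _ hc hr]
  rw [rot_grid r c _ hr hc]
  rw [rot_grid c r _ hc hr]
  apply grid_congr
  intro i hi j hj
  have h1 : r - 1 - (r - 1 - i) = i := by omega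
  have h2 : c - 1 - (c - 1 - j) = j := by omega
  rw [h1, h2]

theorem possibleA_def (p m : List (List Int)) :
    possibleA p m = true ↔
      (p = rot m ∨ p = rot (rot m) ∨ p = rot (rot (rot m)) ∨ p = rot (rot (rot (rot m)))) := by
  show possibleStep 4 p m = true ↔ _
  simp only [possibleStep]
  split_ifs with h1 h2 h3 h4 <;> simp_all

theorem mem_targets (p x : List (List Int)) :
    x ∈ targetsB p ↔ (x = p ∨ x = rot p ∨ x = rot (rot p) ∨ x = rot (rot (rot p))) := by
  unfold targetsB
  simp

-- the key pointwise equivalence on rectangular puzzles: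
-- A's possible test = B's single-rotation membership test
theorem key_eq (p m : List (List Int)) (hp : RectP p) :
    possibleA p m = decide (rot m ∈ targetsB p) := by
  have hm5 : rot (rot (rot (rot (rot m)))) = rot m := rot4 (rot m) (rect_rot m)
  have hp4 : rot (rot (rot (rot p))) = p := rot4 p hp
  rcases hb : possibleA p m with _ | _
  · symm
    simp only [decide_eq_false_iff_not]
    intro hmem
    have hA : possibleA p m = true := by
      apply (possibleA_def p m).mpr
      rcases (mem_targets p (rot m)).mp hmem with h | h | h | h
      · exact Or.inl h.symm
      · -- rot m = rot p ⇒ p = rot⁴ m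
        right; right; right
        have := congrArg (fun z => rot (rot (rot z))) h
        simp only at this
        rw [this, hp4]
      · -- rot m = rot² p ⇒ p = rot³ m
        right; right; left
        have := congrArg (fun z => rot (rot z)) h
        simp only at this
        rw [this, hp4]
      · -- rot m = rot³ p ⇒ p = rot² m
        right; left
        have := congrArg (fun z => rot z) h
        simp only at this
        rw [this, hp4]
    simp [hb] at hA
  · symm
    simp only [decide_eq_true_eq]
    apply (mem_targets p (rot m)).mpr
    rcases (possibleA_def p m).mp hb with h | h | h | h
    · exact Or.inl h.symm
    · -- p = rot² m ⇒ rot³ p = rot⁵ m = rot m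
      right; right; right
      have := congrArg (fun z => rot (rot (rot z))) h
      simp only at this
      rw [this, hm5]
    · -- p = rot³ m ⇒ rot² p = rot⁵ m = rot m
      right; right; left
      have := congrArg (fun z => rot (rot z)) h
      simp only at this
      rw [this, hm5]
    · -- p = rot⁴ m ⇒ rot p = rot⁵ m = rot m
      right; left
      have := congrArg (fun z => rot z) h
      simp only at this
      rw [this, hm5]

theorem assocGet?_isSome_of_mem (d : List (Int × List (List (List Int)))) (k : Int)
    (h : k ∈ d.map Prod.fst) : (assocGet? d k).isSome = true := by
  induction d with
  | nil => simp at h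
  | cons p rest ih =>
      unfold assocGet?
      by_cases hk : p.1 = k
      · simp [hk]
      · rw [if_neg hk]
        apply ih
        simp only [List.map_cons, List.mem_cons] at h
        rcases h with h | h
        · exact absurd h.symm hk
        · exact h

theorem findMatch_sound (p : List (List Int)) :
    ∀ ms m, findMatch p ms = some m → possibleA p m = true := by
  intro ms
  induction ms with
  | nil => intro m h; simp [findMatch] at h
  | cons x xs ih =>
      intro m h
      unfold findMatch at h
      split_ifs at h with hx
      · cases h; exact hx
      · exact ih m h

-- A's find-then-remove equals B's scan-with-pop (rectangular puzzle)
theorem find_scan (p : List (List Int)) (hp : RectP p) :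
    ∀ ms, (findMatch p ms).map (fun m => removeF m ms) = scanB (targetsB p) ms := by
  intro ms
  induction ms with
  | nil => simp [findMatch, scanB]
  | cons m rest ih =>
      unfold findMatch scanB
      by_cases hm : possibleA p m = true
      · have hmem : rot m ∈ targetsB p := by
          have := key_eq p m hp
          rw [hm] at this
          exact of_decide_eq_true this.symm
        rw [if_pos hm, if_pos hmem]
        simp [removeF]
      · have hmem : ¬ (rot m ∈ targetsB p) := by
          intro hc
          exact hm ((key_eq p m hp).trans (decide_eq_true hc))
        rw [if_neg hm, if_neg hmem, ← ih]
        cases hfind : findMatch p rest with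
        | none => simp
        | some m' =>
            have hm' : possibleA p m' = true := findMatch_sound p rest m' hfind
            have hne : m ≠ m' := by
              intro hc
              rw [hc] at hm
              exact hm hm'
            simp [removeF, hne]

-- ===== VERDICT (by name: the statement is the Claim_ definition above) =====
theorem matching_puzzle_spec : Claim_equal_matching_puzzle := by
  intro puzzle puzzle_length puzzle_dict answer _ hpre
  obtain ⟨hkey, hrect⟩ := hpre
  unfold Spec_matching_puzzle matching_puzzle matching_puzzle_alt
  cases hget : assocGet? puzzle_dict puzzle_length with
  | none =>
      have := assocGet?_isSome_of_mem puzzle_dict puzzle_length hkey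
      rw [hget] at this
  | some ms =>
      simp only
      have := find_scan puzzle hrect ms
      cases hfind : findMatch puzzle ms with
      | none =>
          rw [hfind] at this
          simp only [Option.map_none] at this
          rw [← this]
      | some m =>
          rw [hfind] at this
          simp only [Option.map_some] at this
          rw [← this]
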